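-- pv_equiv track=rewrite | github.com/Tefoni/GTU-Projects | Python Projects/Assignment1/project1.py | generate
-- ===== SOURCE A (Python) =====
-- def generate(row,column):
--     board = []
--     cell_value = 0
--     for i in range(row):
--         board.append([])
--         for j in range(column):
--             board[i].append(cell_value)
--             cell_value+=1
--
--     return board
-- ===== SOURCE B (Python) =====
-- def generate(row, column):
--     flat = list(range(max(row, 0) * max(column, 0)))
--     board = []
--     start = 0
--     for _ in range(row):
--         board.append(flat[start:start + column])
--         start += column
--     return board
-- ===== Notes on version B (the rewrite author's own statement) =====
-- stated objective: alternative
-- what changed: Replaces A's single nested pass with a cross-row mutable cell counter by two staged passes: build the flat sequence 0..row*column-1 once, then partition it into rows by slicing (flat[:column] / flat[column:]), so no counter is carried between cells or rows.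
import Mathlib
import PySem

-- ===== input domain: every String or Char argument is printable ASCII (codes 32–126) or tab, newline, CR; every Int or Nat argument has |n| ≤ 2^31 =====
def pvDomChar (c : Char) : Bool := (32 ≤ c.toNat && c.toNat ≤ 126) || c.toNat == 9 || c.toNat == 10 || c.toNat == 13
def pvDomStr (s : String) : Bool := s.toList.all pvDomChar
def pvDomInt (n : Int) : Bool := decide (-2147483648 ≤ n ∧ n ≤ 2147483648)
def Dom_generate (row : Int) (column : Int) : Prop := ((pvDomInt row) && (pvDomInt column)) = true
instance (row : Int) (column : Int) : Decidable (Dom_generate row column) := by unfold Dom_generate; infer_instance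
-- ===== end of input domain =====

-- B replaces A's per-cell running counter with two staged passes: build the flat
-- sequence once, then partition it into rows by slicing (objective: alternative).


-- ===== PORT A =====
-- for i in range(row): board.append([]); for j in range(column): board[i].append(cell_value); cell_value += 1
-- state: (board, cell_value); the fresh row appended by board.append([]) is the row the inner loop extends.
def generate (row : Int) (column : Int) : List (List Int) :=
  ((PySem.List.pyRange 0 row 1).foldl
    (fun (st : List (List Int) × Int) _ =>
      let inner := (PySem.List.pyRange 0 column 1).foldl
        (fun (p : List Int × Int) _ => (p.1 ++ [p.2], p.2 + 1)) ([], st.2)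
      (st.1 ++ [inner.1], inner.2))
    ([], 0)).1

-- ===== PORT B =====
-- flat = list(range(max(row,0)*max(column,0))); start = 0
-- for _ in range(row): board.append(flat[start:start+column]); start += column
def generate_alt (row : Int) (column : Int) : List (List Int) :=
  let flat := PySem.List.pyRange 0 (max row 0 * max column 0) 1
  ((PySem.List.pyRange 0 row 1).foldl
    (fun (st : List (List Int) × Int) _ =>
      (st.1 ++ [PySem.List.slice flat (some st.2) (some (st.2 + column))],
       st.2 + column))
    ([], 0)).1

-- ===== PRECONDITION & SPEC =====
def Spec_generate (row : Int) (column : Int) (out : List (List Int)) : Prop := out = generate_alt row column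
instance (row : Int) (column : Int) (out : List (List Int)) : Decidable (Spec_generate row column out) := by unfold Spec_generate; infer_instance

-- ===== CLAIM (what is proved, stated in full; the proofs are below) =====
def Claim_equal_generate : Prop := ∀ (row : Int) (column : Int), Dom_generate row column → Spec_generate row column (generate row column)

-- ===== LEMMAS AND PROOFS =====

-- the common closed form both ports are reduced to
def gridForm (row : Int) (column : Int) : List (List Int) :=
  (List.range row.toNat).map
    (fun i => (List.range column.toNat).map (fun j => ((i * column.toNat + j : Nat) : Int)))

theorem inner_fold_eq (n : Nat) (c : Int) :
    (List.range n).foldl (fun (p : List Int × Int) _ => (p.1 ++ [p.2], p.2 + 1)) ([], c)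
      = ((List.range n).map (fun k : Nat => c + (k : Int)), c + (n : Int)) := by
  induction n with
  | zero => simp
  | succ n ih =>
    rw [List.range_succ, List.foldl_append, ih]
    simp only [List.foldl_cons, List.foldl_nil, List.map_append,
      List.map_cons, List.map_nil, Prod.mk.injEq]
    exact ⟨trivial, by push_cast; ring⟩

theorem outer_fold_eq (m : Nat) (k : Nat) (acc : List (List Int)) (c : Int) :
    (List.range m).foldl
      (fun (st : List (List Int) × Int) _ =>
        let inner := (List.range k).foldl
          (fun (p : List Int × Int) _ => (p.1 ++ [p.2], p.2 + 1)) ([], st.2)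
        (st.1 ++ [inner.1], inner.2))
      (acc, c)
      = (acc ++ (List.range m).map
          (fun i : Nat => (List.range k).map (fun j : Nat => c + (i : Int) * (k : Int) + (j : Int))),
         c + (m : Int) * (k : Int)) := by
  induction m generalizing acc c with
  | zero => simp
  | succ m ih =>
    rw [List.range_succ, List.foldl_append, ih]
    simp only [List.foldl_cons, List.foldl_nil, inner_fold_eq,
      List.map_append, List.map_cons, List.map_nil, Prod.mk.injEq, List.append_assoc]
    exact ⟨trivial, by push_cast; ring⟩

theorem A_eq_gridForm (row column : Int) : generate row column = gridForm row column := by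
  unfold generate gridForm
  rw [PySem.List.pyRange_one, PySem.List.pyRange_one]
  simp only [Int.sub_zero, List.foldl_map]
  rw [outer_fold_eq]
  simp only [List.nil_append]
  refine List.map_congr_left ?_
  intro i _
  refine List.map_congr_left ?_
  intro j _
  push_cast
  ring

theorem slice_nil (a b : Option Int) : PySem.List.slice ([] : List Int) a b = [] := by
  refine List.eq_nil_iff_forall_not_mem.mpr ?_
  intro x hx
  simpa using PySem.List.mem_of_mem_slice ([] : List Int) a b hx

theorem chunk_fold_empty {α : Type} (l : List α) (col : Int) (acc : List (List Int)) (s : Int) :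
    (l.foldl
      (fun (st : List (List Int) × Int) _ =>
        (st.1 ++ [PySem.List.slice ([] : List Int) (some st.2) (some (st.2 + col))],
         st.2 + col))
      (acc, s)).1
      = acc ++ l.map (fun _ => []) := by
  induction l generalizing acc s with
  | nil => simp
  | cons x l ih =>
    simp only [List.foldl_cons]
    rw [slice_nil, ih]
    simp

theorem slice_flat (a n N : Nat) (h : a + n ≤ N) :
    PySem.List.slice ((List.range N).map (fun t : Nat => (0 : Int) + (t : Int)))
        (some ((a : Nat) : Int)) (some (((a : Nat) : Int) + ((n : Nat) : Int)))
      = (List.range n).map (fun j : Nat => ((a + j : Nat) : Int)) := by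
  rw [show ((a : Nat) : Int) + ((n : Nat) : Int) = (((a + n : Nat) : Nat) : Int) by push_cast; ring]
  rw [PySem.List.slice_natCast]
  rw [show N = a + (N - a) from (Nat.add_sub_cancel' (le_trans (Nat.le_add_right a n) h)).symm,
      List.range_add, List.map_append, List.map_map]
  rw [List.drop_append_of_le_length (by simp), List.drop_of_length_le (by simp), List.nil_append]
  rw [Nat.add_sub_cancel_left, ← List.map_take, List.take_range,
      Nat.min_eq_left (by omega : n ≤ N - a)]
  refine List.map_congr_left ?_
  intro j _
  simp only [Function.comp_apply]
  push_cast
  ring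

theorem chunk_fold {α : Type} (l : List α) (k cn N : Nat) (hN : (k + l.length) * cn ≤ N)
    (acc : List (List Int)) :
    l.foldl
      (fun (st : List (List Int) × Int) _ =>
        (st.1 ++ [PySem.List.slice ((List.range N).map (fun t : Nat => (0 : Int) + (t : Int)))
                    (some st.2) (some (st.2 + (cn : Int)))],
         st.2 + (cn : Int)))
      (acc, ((k * cn : Nat) : Int))
      = (acc ++ (List.range l.length).map
          (fun i : Nat => (List.range cn).map (fun j : Nat => (((k + i) * cn + j : Nat) : Int))),
         (((k + l.length) * cn : Nat) : Int)) := by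
  induction l generalizing k acc with
  | nil => simp
  | cons x l ih =>
    simp only [List.length_cons] at hN
    have hN' : (k + 1 + l.length) * cn ≤ N := by
      have e : k + 1 + l.length = k + (l.length + 1) := by omega
      rw [e]; exact hN
    have hhead : k * cn + cn ≤ N := by
      have h1 : (k + 1) * cn ≤ (k + 1 + l.length) * cn := Nat.mul_le_mul_right _ (by omega)
      have h2 := le_trans h1 hN'
      rw [Nat.succ_mul] at h2
      exact h2
    simp only [List.foldl_cons, List.length_cons]
    rw [slice_flat (k * cn) cn N hhead]
    rw [show ((k * cn : Nat) : Int) + (cn : Int) = (((k + 1) * cn : Nat) : Int) by push_cast; ring]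
    rw [ih (k + 1) hN']
    refine Prod.ext ?_ (by push_cast; ring_nf)
    rw [List.range_succ_eq_map]
    simp only [List.map_cons, List.map_map, List.append_assoc, List.singleton_append]
    congr 1
    congr 1
    refine (List.map_congr_left ?_).symm
    intro i _
    simp only [Function.comp_apply, Nat.succ_eq_add_one]
    have e : k + (i + 1) = k + 1 + i := by omega
    rw [e]

theorem B_eq_gridForm (row column : Int) : generate_alt row column = gridForm row column := by
  simp only [generate_alt, gridForm]
  by_cases hc : column ≤ 0
  · have h0 : max column 0 = 0 := by omega
    have hcn : column.toNat = 0 := by omega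
    rw [h0, mul_zero, hcn]
    have hflat : PySem.List.pyRange 0 0 1 = ([] : List Int) := by
      rw [PySem.List.pyRange_one]; simp
    rw [hflat, chunk_fold_empty]
    rw [PySem.List.pyRange_one]
    simp [Function.comp_def, List.map_const']
  · have hcpos : 0 < column := by omega
    have hcn : ((column.toNat : Nat) : Int) = column := Int.toNat_of_nonneg hcpos.le
    by_cases hr : row ≤ 0
    · have hrow : PySem.List.pyRange 0 row 1 = ([] : List Int) := by
        rw [PySem.List.pyRange_one]
        have : (row - 0).toNat = 0 := by omega
        rw [this]; simp
      have hrn : row.toNat = 0 := by omega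
      rw [hrow, hrn]
      simp
    · have hrpos : 0 < row := by omega
      have hmaxr : max row 0 = row := max_eq_left hrpos.le
      have hmaxc : max column 0 = column := max_eq_left hcpos.le
      rw [hmaxr, hmaxc]
      have hN : (row * column - 0).toNat = row.toNat * column.toNat := by
        have h1 : row * column = ((row.toNat * column.toNat : Nat) : Int) := by
          push_cast [Int.toNat_of_nonneg hrpos.le, Int.toNat_of_nonneg hcpos.le]
          ring
        omega
      have hflat : PySem.List.pyRange 0 (row * column) 1
          = (List.range (row.toNat * column.toNat)).map (fun t : Nat => (0 : Int) + (t : Int)) := by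
        rw [PySem.List.pyRange_one, hN]
      have hlenr : (PySem.List.pyRange 0 row 1).length = row.toNat := by
        rw [PySem.List.pyRange_one]; simp
      have hfold := chunk_fold (α := Int) (PySem.List.pyRange 0 row 1) 0 column.toNat
        (row.toNat * column.toNat) (by rw [hlenr]; simp) ([])
      rw [hcn] at hfold
      simp only [Nat.zero_mul, Nat.cast_zero, Nat.zero_add] at hfold
      rw [hflat, hfold, hlenr]
      simp

-- ===== VERDICT (by name: the statement is the Claim_ definition above) =====
theorem generate_spec : Claim_equal_generate := by
  intro row column _
  unfold Spec_generate
  rw [A_eq_gridForm, B_eq_gridForm]
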